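-- pv_equiv track=rewrite | github.com/YoongeonChoi/stock-predict | backend/app/services/market/universe.py | flatten_universe
-- ===== SOURCE A (Python) =====
-- def flatten_universe(universe: dict[str, list[str]]) -> list[tuple[str, str]]:
--     flattened: list[tuple[str, str]] = []
--     seen: set[str] = set()
--     for sector, tickers in universe.items():
--         for ticker in tickers:
--             if ticker in seen:
--                 continue
--             seen.add(ticker)
--             flattened.append((sector, ticker))
--     return flattened
-- ===== SOURCE B (Python) =====
-- def flatten_universe(universe: dict[str, list[str]]) -> list[tuple[str, str]]:
--     # Stage 1: flatten everything; Stage 2: take the head pair, delete every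
--     # later pair carrying the same ticker, repeat. No seen-set, no dict.
--     pairs = [(s, t) for s, tickers in universe.items() for t in tickers]
--     out: list[tuple[str, str]] = []
--     while pairs:
--         sector, ticker = pairs[0]
--         out.append((sector, ticker))
--         pairs = [p for p in pairs[1:] if p[1] != ticker]
--     return out
-- ===== Notes on version B (the rewrite author's own statement) =====
-- stated objective: alternative
-- what changed: Instead of one pass with a seen-set and conditional append, B first flattens all (sector, ticker) pairs into one list and then deduplicates by repeatedly emitting the head pair and filtering out every later pair with the same ticker.
import Mathlib
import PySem

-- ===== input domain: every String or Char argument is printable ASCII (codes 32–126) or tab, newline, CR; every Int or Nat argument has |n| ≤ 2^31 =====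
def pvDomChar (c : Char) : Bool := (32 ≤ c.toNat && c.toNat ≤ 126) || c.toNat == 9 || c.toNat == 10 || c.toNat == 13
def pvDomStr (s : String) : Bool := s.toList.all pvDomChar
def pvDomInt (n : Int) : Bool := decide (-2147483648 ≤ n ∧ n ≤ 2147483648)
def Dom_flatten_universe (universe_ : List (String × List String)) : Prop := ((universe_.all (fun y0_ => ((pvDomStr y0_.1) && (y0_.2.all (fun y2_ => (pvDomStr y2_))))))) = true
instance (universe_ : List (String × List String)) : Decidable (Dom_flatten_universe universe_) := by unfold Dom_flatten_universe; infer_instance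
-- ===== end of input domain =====

-- B replaces A's seen-set single pass by two stages: flatten every (sector, ticker)
-- pair into one list, then dedup by repeatedly emitting the head pair and filtering
-- out all later pairs with its ticker (alternative decomposition; not faster).

-- ===== PORT A =====
def flatten_universe (universe_ : List (String × List String)) : List (String × String) :=
  (universe_.foldl (fun st p =>
      p.2.foldl (fun st2 ticker =>
        if PySem.Set.contains st2.2 ticker then st2
        else (st2.1 ++ [(p.1, ticker)], PySem.Set.add st2.2 ticker)) st)
    (([] : List (String × String)), (PySem.Set.empty : PySem.Set String))).1

-- ===== PORT B =====
-- the while-loop of Source B: take head, drop later pairs with the same ticker, recurse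
def fuDedup : List (String × String) → List (String × String)
  | [] => []
  | p :: ps => p :: fuDedup (ps.filter (fun q => q.2 != p.2))
termination_by l => l.length
decreasing_by
  simp only [List.length_unattach]
  exact Nat.lt_succ_of_le (le_trans (List.length_filter_le _ _) (le_of_eq List.length_attach))

def flatten_universe_alt (universe_ : List (String × List String)) : List (String × String) :=
  let pairs := universe_.flatMap (fun p => p.2.map (fun t => (p.1, t)))
  fuDedup pairs

-- ===== PRECONDITION & SPEC =====
def Spec_flatten_universe (universe_ : List (String × List String)) (out : List (String × String)) : Prop := out = flatten_universe_alt universe_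
instance (universe_ : List (String × List String)) (out : List (String × String)) : Decidable (Spec_flatten_universe universe_ out) := by unfold Spec_flatten_universe; infer_instance

-- ===== CLAIM (what is proved, stated in full; the proofs are below) =====
def Claim_equal_flatten_universe : Prop := ∀ (universe_ : List (String × List String)), Dom_flatten_universe universe_ → Spec_flatten_universe universe_ (flatten_universe universe_)

-- ===== LEMMAS AND PROOFS =====

-- unfolding equations of fuDedup (well-founded recursion)
lemma fuDedup_nil : fuDedup [] = [] := by rw [fuDedup.eq_def]

lemma fuDedup_cons (p : String × String) (ps : List (String × String)) :
    fuDedup (p :: ps) = p :: fuDedup (ps.filter (fun q => q.2 != p.2)) := by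
  rw [fuDedup.eq_def]

-- A's nested loops are one fold over the flattened pair list.
lemma fu_flatten (l : List (String × List String))
    (st0 : List (String × String) × PySem.Set String) :
    l.foldl (fun st p =>
        p.2.foldl (fun st2 ticker =>
          if PySem.Set.contains st2.2 ticker then st2
          else (st2.1 ++ [(p.1, ticker)], PySem.Set.add st2.2 ticker)) st) st0
    = (l.flatMap (fun p => p.2.map (fun t => (p.1, t)))).foldl
        (fun st2 q =>
          if PySem.Set.contains st2.2 q.2 then st2
          else (st2.1 ++ [q], PySem.Set.add st2.2 q.2)) st0 := by
  induction l generalizing st0 with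
  | nil => rfl
  | cons p ps ih =>
    simp only [List.foldl_cons, List.flatMap_cons, List.foldl_append, List.foldl_map]
    exact ih _

lemma fu_contains_add (s : PySem.Set String) (x y : String) :
    PySem.Set.contains (PySem.Set.add s x) y = (PySem.Set.contains s y || y == x) := by
  by_cases hx : y = x <;> by_cases hs : y ∈ s <;>
    simp [PySem.Set.mem_add, hx, hs]

-- The seen-set fold computes acc ++ fuDedup of the not-yet-seen pairs.
lemma fu_fold_dedup (ps : List (String × String)) (acc : List (String × String))
    (seen : PySem.Set String) :
    (ps.foldl (fun st2 q =>
        if PySem.Set.contains st2.2 q.2 then st2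
        else (st2.1 ++ [q], PySem.Set.add st2.2 q.2)) (acc, seen)).1
    = acc ++ fuDedup (ps.filter (fun q => !PySem.Set.contains seen q.2)) := by
  induction ps generalizing acc seen with
  | nil => simp [fuDedup_nil]
  | cons p ps ih =>
    simp only [List.foldl_cons, List.filter_cons]
    by_cases h : PySem.Set.contains seen p.2 = true
    · simp only [h, if_true, Bool.not_true, Bool.false_eq_true, if_false]
      exact ih acc seen
    · have h' : PySem.Set.contains seen p.2 = false := by simpa using h
      simp only [h', Bool.false_eq_true, if_false, Bool.not_false, if_true]
      rw [ih (acc ++ [p]) (PySem.Set.add seen p.2), List.append_assoc, List.singleton_append]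
      refine congrArg (acc ++ ·) ?_
      rw [fuDedup_cons]
      congr 1
      rw [List.filter_filter]
      refine congrArg fuDedup ?_
      apply List.filter_congr
      intro q _
      rw [fu_contains_add]
      cases hc : PySem.Set.contains seen q.2 <;> cases he : (q.2 == p.2) <;> simp_all

-- ===== VERDICT (by name: the statement is the Claim_ definition above) =====
theorem flatten_universe_spec : Claim_equal_flatten_universe := by
  intro universe_ _
  unfold Spec_flatten_universe flatten_universe flatten_universe_alt
  rw [fu_flatten, fu_fold_dedup]
  simp [PySem.Set.empty]
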